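-- pv_equiv track=rewrite | github.com/nastyh/LeetCode | Basic Data Structures/2270_number_of_ways_to_split_array.py | waysToSplitArray_brute_force
-- ===== SOURCE A (Python) =====
-- from typing import List
--
-- def waysToSplitArray_brute_force(nums: List[int]) -> int:
--     """
--     O(n^2) and O(1)
--     easy to understand:
--     have a pointer going to the second to last element
--     recalculate the left sum
--     right sum is slighly optimized by doing sum_of_nums minus left_part
--     Works but times out
--     """
--     res = 0
--     sum_of_nums = sum(nums)
--     for i in range(len(nums)-1):
--         left_part = sum(nums[:i +1])
--         right_part = sum_of_nums - left_part
--         if left_part >= right_part: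
--             res += 1
--     return res
-- ===== SOURCE B (Python) =====
-- from typing import List
--
-- def waysToSplitArray_brute_force(nums: List[int]) -> int:
--     # One pass: maintain a running prefix sum; left >= right  <=>  2*prefix >= total.
--     total = sum(nums)
--     res = 0
--     prefix = 0
--     for x in nums[:-1]:
--         prefix += x
--         if 2 * prefix >= total:
--             res += 1
--     return res
-- ===== Notes on version B (the rewrite author's own statement) =====
-- stated objective: faster
-- what changed: Replaces the quadratic loop that re-sums the slice nums[:i+1] at every split point with a single pass over nums[:-1] maintaining a running prefix sum and comparing 2*prefix against the total.
import Mathlib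
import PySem

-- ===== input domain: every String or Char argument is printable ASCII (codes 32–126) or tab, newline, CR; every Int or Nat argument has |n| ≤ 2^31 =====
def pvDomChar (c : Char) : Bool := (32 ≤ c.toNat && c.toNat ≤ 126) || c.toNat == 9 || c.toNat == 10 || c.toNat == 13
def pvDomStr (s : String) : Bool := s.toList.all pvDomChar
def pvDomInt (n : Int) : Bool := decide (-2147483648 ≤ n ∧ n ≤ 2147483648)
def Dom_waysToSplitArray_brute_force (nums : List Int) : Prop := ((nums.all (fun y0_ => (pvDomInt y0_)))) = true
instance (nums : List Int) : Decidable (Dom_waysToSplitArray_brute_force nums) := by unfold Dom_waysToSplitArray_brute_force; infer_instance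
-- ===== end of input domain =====

-- B replaces A's quadratic re-summing of nums[:i+1] at every split point with a
-- single pass keeping a running prefix sum (faster: O(n) instead of O(n^2)).


-- ===== PORT A =====
def waysToSplitArray_brute_force (nums : List Int) : Int :=
  let sum_of_nums := nums.sum
  (PySem.List.pyRange 0 ((nums.length : Int) - 1) 1).foldl
    (fun res i =>
      let left_part := (PySem.List.slice nums none (some (i + 1))).sum
      let right_part := sum_of_nums - left_part
      if left_part ≥ right_part then res + 1 else res)
    0

-- ===== PORT B =====
def waysToSplitArray_brute_force_alt (nums : List Int) : Int :=
  let total := nums.sum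
  ((PySem.List.slice nums none (some (-1))).foldl
    (fun (s : Int × Int) x =>
      let pfx := s.2 + x
      (if 2 * pfx ≥ total then s.1 + 1 else s.1, pfx))
    (0, 0)).1

-- ===== PRECONDITION & SPEC =====
def Spec_waysToSplitArray_brute_force (nums : List Int) (out : Int) : Prop := out = waysToSplitArray_brute_force_alt nums
instance (nums : List Int) (out : Int) : Decidable (Spec_waysToSplitArray_brute_force nums out) := by unfold Spec_waysToSplitArray_brute_force; infer_instance

-- ===== CLAIM (what is proved, stated in full; the proofs are below) =====
def Claim_equal_waysToSplitArray_brute_force : Prop := ∀ (nums : List Int), Dom_waysToSplitArray_brute_force nums → Spec_waysToSplitArray_brute_force nums (waysToSplitArray_brute_force nums)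

-- ===== LEMMAS AND PROOFS =====

-- reference count: number of proper prefixes (extending `pre`) whose doubled sum reaches `total`
def pvCnt (total pre : Int) : List Int → Int
  | [] => 0
  | x :: t => (if 2 * (pre + x) ≥ total then 1 else 0) + pvCnt total (pre + x) t

theorem pvCnt_append (total : Int) (l : List Int) (x : Int) :
    ∀ pre, pvCnt total pre (l ++ [x]) =
      pvCnt total pre l + (if 2 * (pre + l.sum + x) ≥ total then 1 else 0) := by
  induction l with
  | nil => intro pre; simp [pvCnt]
  | cons y t ih =>
      intro pre
      simp only [List.cons_append, pvCnt, ih (pre + y), List.sum_cons]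
      ring_nf

theorem bSide (total : Int) (ys : List Int) :
    ∀ res pre, ys.foldl
        (fun (s : Int × Int) x =>
          let pfx := s.2 + x
          (if 2 * pfx ≥ total then s.1 + 1 else s.1, pfx)) (res, pre)
      = (res + pvCnt total pre ys, pre + ys.sum) := by
  induction ys with
  | nil => intro res pre; simp [pvCnt]
  | cons x t ih =>
      intro res pre
      simp only [List.foldl_cons, ih, pvCnt, List.sum_cons]
      split_ifs with h <;> refine Prod.ext ?_ ?_ <;> dsimp <;> try ring

theorem aSide (nums : List Int) (total : Int) :
    ∀ k, k ≤ nums.length → ∀ res : Int,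
      ((List.range k).map (fun j : Nat => (0 : Int) + (j : Int))).foldl
        (fun res i =>
          if (PySem.List.slice nums none (some (i + 1))).sum ≥
              total - (PySem.List.slice nums none (some (i + 1))).sum
          then res + 1 else res) res
      = res + pvCnt total 0 (nums.take k) := by
  intro k
  induction k with
  | zero => intro _ res; simp [pvCnt]
  | succ k ih =>
      intro hk res
      have hk' : k < nums.length := by omega
      rw [List.range_succ, List.map_append, List.foldl_append, ih (by omega)]
      simp only [List.map_cons, List.map_nil, List.foldl_cons, List.foldl_nil]
      have hc : (0 : Int) + (k : Int) + 1 = ((k + 1 : Nat) : Int) := by push_cast; ring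
      rw [hc, PySem.List.slice_to_natCast]
      have htake : nums.take (k + 1) = nums.take k ++ [nums[k]] :=
        List.take_succ_eq_append_getElem hk'
      rw [htake, pvCnt_append, List.sum_append, List.sum_cons, List.sum_nil]
      split_ifs <;> omega

theorem ports_agree (nums : List Int) :
    waysToSplitArray_brute_force nums = waysToSplitArray_brute_force_alt nums := by
  unfold waysToSplitArray_brute_force waysToSplitArray_brute_force_alt
  dsimp only
  rw [PySem.List.slice_to_neg_one, PySem.List.pyRange_one, bSide]
  have hlen : (((nums.length : Int) - 1 - 0).toNat) = nums.length - 1 := by omega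
  rw [hlen, aSide nums nums.sum (nums.length - 1) (by omega) 0, ← List.dropLast_eq_take]

-- ===== VERDICT (by name: the statement is the Claim_ definition above) =====
theorem waysToSplitArray_brute_force_spec : Claim_equal_waysToSplitArray_brute_force := by
  intro nums _
  unfold Spec_waysToSplitArray_brute_force
  exact ports_agree nums
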